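-- pv_equiv track=rewrite | github.com/WUT-IDEA/multimodal-machine-translation-with-low-resource | prcv2024-UMMT-DGIF/src/model/trainer.py | get_segments
-- ===== SOURCE A (Python) =====
-- def get_segments(mask_len, span_len):
--     segs = []
--     while mask_len >= span_len:
--         segs.append(span_len)
--         mask_len -= span_len
--     if mask_len != 0:
--         segs.append(mask_len)
--     return segs
-- ===== SOURCE B (Python) =====
-- def get_segments(mask_len, span_len):
--     count = max(mask_len // span_len, 0)
--     rem = mask_len - count * span_len
--     return [span_len] * count + ([rem] if rem else [])
-- ===== Notes on version B (the rewrite author's own statement) =====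
-- stated objective: simpler
-- what changed: Replaces the repeated-subtraction while-loop with a closed-form division: count = max(mask_len // span_len, 0) full spans built by list replication plus the remainder if nonzero.
-- outside the precondition, e.g. on get_segments(-1, 0): A returns [-1], B raises ZeroDivisionError; on get_segments(-5, -2): A returns [-5], B returns [-2, -2, -1]
import Mathlib
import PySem

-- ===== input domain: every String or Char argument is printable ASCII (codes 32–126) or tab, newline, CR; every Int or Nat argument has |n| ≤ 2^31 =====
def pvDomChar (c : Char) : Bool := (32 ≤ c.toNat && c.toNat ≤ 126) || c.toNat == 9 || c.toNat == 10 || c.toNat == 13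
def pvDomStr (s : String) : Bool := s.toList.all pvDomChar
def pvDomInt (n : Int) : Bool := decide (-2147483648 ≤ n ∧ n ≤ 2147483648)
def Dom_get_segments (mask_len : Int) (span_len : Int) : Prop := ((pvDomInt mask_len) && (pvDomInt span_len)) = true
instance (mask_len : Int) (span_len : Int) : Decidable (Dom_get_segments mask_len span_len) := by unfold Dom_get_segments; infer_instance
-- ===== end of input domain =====

-- B replaces A's repeated-subtraction while-loop by a closed-form division (count = max(mask_len // span_len, 0)); objective: simpler.

-- ===== PORT A =====
-- A's while-loop: returns the final (mask_len, segs) pair; the '0 < span_len' conjunct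
-- is only a termination guard (for span_len ≤ 0 the Python loop either does not run or diverges).
def getSegmentsLoopA (mask_len : Int) (span_len : Int) (segs : List Int) : Int × List Int :=
  if _h : span_len ≤ mask_len ∧ 0 < span_len then
    getSegmentsLoopA (mask_len - span_len) span_len (segs ++ [span_len])
  else (mask_len, segs)
termination_by mask_len.toNat
decreasing_by omega

def get_segments (mask_len : Int) (span_len : Int) : List Int :=
  let r := getSegmentsLoopA mask_len span_len []
  if r.1 ≠ 0 then r.2 ++ [r.1] else r.2

-- ===== PORT B =====
def get_segments_alt (mask_len : Int) (span_len : Int) : List Int :=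
  let count := max (PySem.Int.floordiv mask_len span_len) 0
  let rem := mask_len - count * span_len
  List.replicate count.toNat span_len ++ (if rem ≠ 0 then [rem] else [])

-- ===== PRECONDITION & SPEC =====
-- Pre_ excludes span_len ≤ 0: there the Python A diverges whenever mask_len ≥ span_len,
-- and where it does return (mask_len < span_len ≤ 0) its value is an
-- accident of the never-entered loop, while B's division raises on 0 or floors differently.
def Pre_get_segments (_mask_len : Int) (span_len : Int) : Prop := 0 < span_len
instance (mask_len : Int) (span_len : Int) : Decidable (Pre_get_segments mask_len span_len) := by unfold Pre_get_segments; infer_instance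
def pvWitness_get_segments : Int × Int := (7, 3)
def Spec_get_segments (mask_len : Int) (span_len : Int) (out : List Int) : Prop := out = get_segments_alt mask_len span_len
instance (mask_len : Int) (span_len : Int) (out : List Int) : Decidable (Spec_get_segments mask_len span_len out) := by unfold Spec_get_segments; infer_instance

-- ===== CLAIM (what is proved, stated in full; the proofs are below) =====
def Claim_equal_get_segments : Prop := ∀ (mask_len : Int) (span_len : Int), Dom_get_segments mask_len span_len → Pre_get_segments mask_len span_len → Spec_get_segments mask_len span_len (get_segments mask_len span_len)

-- ===== LEMMAS AND PROOFS =====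

lemma loopA_closed (s : Int) (hs : 0 < s) :
    ∀ (n : Nat) (m : Int), m.toNat = n → ∀ segs : List Int,
      getSegmentsLoopA m s segs =
        (m - s * max (m / s) 0, segs ++ List.replicate (max (m / s) 0).toNat s) := by
  intro n
  induction n using Nat.strong_induction_on with
  | _ n ih =>
    intro m hm segs
    rw [getSegmentsLoopA]
    split_ifs with h
    · obtain ⟨hsm, _⟩ := h
      rw [ih (m - s).toNat (by omega) (m - s) rfl]
      have hdiv : (m - s) / s = m / s - 1 := by
        have := Int.add_mul_ediv_right m (-1) (ne_of_gt hs)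
        simpa [sub_eq_add_neg] using this
      have hq : 1 ≤ m / s := by
        rw [Int.le_ediv_iff_mul_le hs]; omega
      have h1 : max ((m - s) / s) 0 = m / s - 1 := by rw [hdiv]; omega
      have h2 : max (m / s) 0 = m / s := by omega
      rw [h1, h2]
      simp only [Prod.mk.injEq]
      constructor
      · ring
      · have h3 : (m / s).toNat = (m / s - 1).toNat + 1 := by omega
        rw [h3, List.replicate_succ]
        simp
    · have hms : m < s := by omega
      have hq : max (m / s) 0 = 0 := by
        have h1 : ¬ (1 ≤ m / s) := fun h1 => by
          rw [Int.le_ediv_iff_mul_le hs] at h1; omega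
        omega
      rw [hq]
      simp

theorem get_segments_spec : Claim_equal_get_segments := by
  intro m s _ hs
  unfold Spec_get_segments get_segments get_segments_alt
  rw [loopA_closed s hs m.toNat m rfl []]
  rw [PySem.Int.floordiv_eq_ediv_of_pos hs]
  simp only [List.nil_append]
  have hcomm : s * max (m / s) 0 = max (m / s) 0 * s := by ring
  rw [hcomm]
  by_cases h : m - max (m / s) 0 * s = 0 <;> simp [h]
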